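-- pv_equiv track=rewrite | github.com/siegmound/ML_SC2 | src/sc2proj/feature_registry.py | select_features_by_family
-- ===== SOURCE A (Python) =====
-- from collections import defaultdict
--
-- def infer_feature_family(column: str) -> str:
--     col = column.lower()
--     if col in {'matchup', 'race_matchup', 'race_pair', 'league', 'map_name'}:
--         return 'metadata'
--     if 'counter' in col or 'synergy' in col:
--         return 'counter'
--     if 'delta_' in col:
--         return 'delta_15s'
--     if 'trend' in col or 'rolling' in col or 'std_' in col:
--         return 'trend_60_120'
--     if 'scout' in col or 'camera' in col:
--         return 'scouting'
--     if 'entropy' in col or 'unit_types' in col or 'supply_ratio' in col or 'tech' in col: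
--         return 'composition'
--     if 'loss' in col or 'recent_losses' in col:
--         return 'losses'
--     if 'combat' in col or 'army' in col:
--         return 'combat'
--     if any(tok in col for tok in ['worker', 'sq', 'epm', 'income', 'mineral', 'vespene', 'resource']):
--         return 'economy'
--     return 'other'
--
-- def build_feature_family_map(feature_columns: list[str]) -> dict[str, list[str]]:
--     families = defaultdict(list)
--     for col in feature_columns:
--         families[infer_feature_family(col)].append(col)
--     return {k: sorted(v) for k, v in sorted(families.items())}
--
-- def select_features_by_family(feature_columns: list[str], include_families: list[str] | None = None, exclude_families: list[str] | None = None) -> list[str]: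
--     include_families = include_families or []
--     exclude_families = exclude_families or []
--     fam_map = build_feature_family_map(feature_columns)
--     if include_families:
--         selected = []
--         for fam in include_families:
--             selected.extend(fam_map.get(fam, []))
--     else:
--         selected = list(feature_columns)
--     if exclude_families:
--         excluded = set()
--         for fam in exclude_families:
--             excluded.update(fam_map.get(fam, []))
--         selected = [c for c in selected if c not in excluded]
--     return selected
-- ===== SOURCE B (Python) =====
-- def infer_feature_family(column: str) -> str:
--     col = column.lower()
--     if col in {'matchup', 'race_matchup', 'race_pair', 'league', 'map_name'}:
--         return 'metadata'
--     if 'counter' in col or 'synergy' in col: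
--         return 'counter'
--     if 'delta_' in col:
--         return 'delta_15s'
--     if 'trend' in col or 'rolling' in col or 'std_' in col:
--         return 'trend_60_120'
--     if 'scout' in col or 'camera' in col:
--         return 'scouting'
--     if 'entropy' in col or 'unit_types' in col or 'supply_ratio' in col or 'tech' in col:
--         return 'composition'
--     if 'loss' in col or 'recent_losses' in col:
--         return 'losses'
--     if 'combat' in col or 'army' in col:
--         return 'combat'
--     if any(tok in col for tok in ['worker', 'sq', 'epm', 'income', 'mineral', 'vespene', 'resource']):
--         return 'economy'
--     return 'other'
--
-- def select_features_by_family(feature_columns: list[str], include_families: list[str] | None = None, exclude_families: list[str] | None = None) -> list[str]: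
--     # No precomputed family map: one pass tags each column with its family, then
--     # each requested family is a direct sorted scan; excluded families are skipped up front.
--     bad = set(exclude_families or [])
--     if include_families:
--         pairs = [(infer_feature_family(c), c) for c in feature_columns]
--         selected = []
--         for fam in include_families:
--             if fam not in bad:
--                 selected.extend(sorted(c for f, c in pairs if f == fam))
--         return selected
--     return [c for c in feature_columns if infer_feature_family(c) not in bad]
-- ===== Notes on version B (the rewrite author's own statement) =====
-- stated objective: simpler
-- what changed: B drops the precomputed grouped-and-sorted family map: it tags each column with its family in one pass, serves each included family by a direct sorted scan of those tags (skipping families that are also excluded up front), and in the no-include case filters columns by testing the inferred family against the excluded-family name set instead of collecting excluded column strings from the map.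
import Mathlib
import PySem

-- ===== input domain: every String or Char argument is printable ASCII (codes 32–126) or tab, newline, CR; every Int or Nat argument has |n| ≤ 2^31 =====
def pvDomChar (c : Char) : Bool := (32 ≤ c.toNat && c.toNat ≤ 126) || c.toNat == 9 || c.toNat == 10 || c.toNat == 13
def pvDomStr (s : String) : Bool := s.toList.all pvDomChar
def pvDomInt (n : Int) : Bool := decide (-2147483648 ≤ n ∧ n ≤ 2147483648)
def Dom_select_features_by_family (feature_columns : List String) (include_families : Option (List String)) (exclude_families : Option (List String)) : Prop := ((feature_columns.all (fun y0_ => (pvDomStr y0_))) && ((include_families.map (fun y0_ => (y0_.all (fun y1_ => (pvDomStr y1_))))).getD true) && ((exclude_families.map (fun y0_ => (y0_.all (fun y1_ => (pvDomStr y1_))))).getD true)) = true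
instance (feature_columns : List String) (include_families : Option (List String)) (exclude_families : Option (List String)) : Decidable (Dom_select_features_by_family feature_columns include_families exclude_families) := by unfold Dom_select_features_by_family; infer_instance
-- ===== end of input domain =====

-- ===== PORT A =====
-- B removes the grouped family map in favour of direct per-family scans (simpler); infer_feature_family is shared verbatim by both ports.
def inferFamily (column : String) : String :=
  let col := PySem.Str.lower column
  if col == "matchup" || col == "race_matchup" || col == "race_pair" || col == "league" || col == "map_name" then "metadata"
  else if PySem.Str.isIn "counter" col || PySem.Str.isIn "synergy" col then "counter"
  else if PySem.Str.isIn "delta_" col then "delta_15s"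
  else if PySem.Str.isIn "trend" col || PySem.Str.isIn "rolling" col || PySem.Str.isIn "std_" col then "trend_60_120"
  else if PySem.Str.isIn "scout" col || PySem.Str.isIn "camera" col then "scouting"
  else if PySem.Str.isIn "entropy" col || PySem.Str.isIn "unit_types" col || PySem.Str.isIn "supply_ratio" col || PySem.Str.isIn "tech" col then "composition"
  else if PySem.Str.isIn "loss" col || PySem.Str.isIn "recent_losses" col then "losses"
  else if PySem.Str.isIn "combat" col || PySem.Str.isIn "army" col then "combat"
  else if (["worker", "sq", "epm", "income", "mineral", "vespene", "resource"] : List String).any (fun tok => PySem.Str.isIn tok col) then "economy"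
  else "other"

-- build_feature_family_map; 'sorted(families.items())' is sorted by the key component
-- (exact here: dict keys are distinct, so Python's tuple comparison never reaches the second component).
def buildFeatureFamilyMap (feature_columns : List String) : PySem.Dict String (List String) :=
  let families := feature_columns.foldl
    (fun d col => d.modify (inferFamily col) [] (fun v => v ++ [col])) PySem.Dict.empty
  (PySem.List.sorted families.items (fun p => p.1) false).foldl
    (fun d p => d.insert p.1 (PySem.List.sorted p.2 (fun x => x) false)) PySem.Dict.empty

def select_features_by_family (feature_columns : List String) (include_families : Option (List String)) (exclude_families : Option (List String)) : List String :=
  let inc := include_families.getD []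
  let exc := exclude_families.getD []
  let fam_map := buildFeatureFamilyMap feature_columns
  let selected :=
    if inc ≠ [] then
      inc.foldl (fun acc fam => acc ++ fam_map.getD fam []) []
    else
      feature_columns
  if exc ≠ [] then
    let excluded := exc.foldl (fun s fam => PySem.Set.update s (fam_map.getD fam [])) PySem.Set.empty
    selected.filter (fun c => !(PySem.Set.contains excluded c))
  else
    selected

-- ===== PORT B =====
def select_features_by_family_alt (feature_columns : List String) (include_families : Option (List String)) (exclude_families : Option (List String)) : List String :=
  let bad := PySem.Set.ofList (exclude_families.getD [])
  let inc := include_families.getD []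
  if inc ≠ [] then
    let pairs := feature_columns.map (fun c => (inferFamily c, c))
    inc.foldl (fun acc fam =>
      if !(PySem.Set.contains bad fam) then
        acc ++ PySem.List.sorted ((pairs.filter (fun p => p.1 == fam)).map (fun p => p.2)) (fun x => x) false
      else acc) []
  else
    feature_columns.filter (fun c => !(PySem.Set.contains bad (inferFamily c)))

-- ===== PRECONDITION & SPEC =====
def Spec_select_features_by_family (feature_columns : List String) (include_families : Option (List String)) (exclude_families : Option (List String)) (out : List String) : Prop := out = select_features_by_family_alt feature_columns include_families exclude_families
instance (feature_columns : List String) (include_families : Option (List String)) (exclude_families : Option (List String)) (out : List String) : Decidable (Spec_select_features_by_family feature_columns include_families exclude_families out) := by unfold Spec_select_features_by_family; infer_instance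

-- ===== CLAIM (what is proved, stated in full; the proofs are below) =====
def Claim_equal_select_features_by_family : Prop := ∀ (feature_columns : List String) (include_families : Option (List String)) (exclude_families : Option (List String)), Dom_select_features_by_family feature_columns include_families exclude_families → Spec_select_features_by_family feature_columns include_families exclude_families (select_features_by_family feature_columns include_families exclude_families)

-- ===== LEMMAS AND PROOFS =====

-- Every lookup in A's grouped-and-sorted map is the sorted per-family scan B performs directly.
theorem famMap_getD (cols : List String) (fam : String) :
    (buildFeatureFamilyMap cols).getD fam []
      = PySem.List.sorted (cols.filter (fun c => inferFamily c == fam)) (fun x => x) false := by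
  unfold buildFeatureFamilyMap
  set families := cols.foldl
    (fun d col => d.modify (inferFamily col) [] (fun v => v ++ [col])) PySem.Dict.empty with hfam
  have h1 : families.getD fam [] = cols.filter (fun c => inferFamily c == fam) := by
    rw [hfam, show cols.foldl (fun d col => d.modify (inferFamily col) [] (fun v => v ++ [col])) PySem.Dict.empty
        = (cols.map (fun c => ((inferFamily c, c) : String × String))).foldl
            (fun d p => d.modify p.1 [] (fun v => v ++ [p.2])) PySem.Dict.empty
      by rw [List.foldl_map]]
    rw [PySem.Dict.getD_foldl_modify_append]
    simp [List.filter_map, List.map_map, Function.comp_def]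
  have hn : families.keys.Nodup := by
    rw [hfam]
    exact PySem.Dict.nodup_keys_foldl_modify_key cols inferFamily []
      (fun d col v => v ++ [col]) PySem.Dict.empty (by simp [PySem.Dict.keys_empty])
  have hk : families.keys = PySem.Set.ofList (cols.map inferFamily) := by
    rw [hfam, PySem.Dict.keys_foldl_modify_key cols inferFamily []
      (fun d col v => v ++ [col]) PySem.Dict.empty]
    simp [PySem.Dict.keys_empty, PySem.Set.ofList_eq_foldl, PySem.Set.update]
  set sortedItems := PySem.List.sorted families.items (fun p => p.1) false with hsi
  have hpm : (sortedItems.map (fun p => p.1)).Perm families.keys := by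
    have := (PySem.List.sorted_perm families.items (fun p => p.1) false).map (fun p => p.1)
    simpa [PySem.Dict.keys] using this
  have hnd2 : (sortedItems.map (fun p => p.1)).Nodup := hpm.nodup_iff.mpr hn
  have hitems : (sortedItems.foldl
      (fun d p => d.insert p.1 (PySem.List.sorted p.2 (fun x => x) false)) PySem.Dict.empty).items
      = sortedItems.map (fun p => (p.1, PySem.List.sorted p.2 (fun x => x) false)) := by
    have := PySem.Dict.items_foldl_insert_fresh sortedItems (fun p => p.1)
      (fun p => PySem.List.sorted p.2 (fun x => x) false) PySem.Dict.empty
      (by intro a _; simp [PySem.Dict.contains_empty]) hnd2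
    simpa [PySem.Dict.empty] using this
  have hnd3 : (sortedItems.foldl
      (fun d p => d.insert p.1 (PySem.List.sorted p.2 (fun x => x) false)) PySem.Dict.empty).keys.Nodup := by
    exact PySem.Dict.nodup_keys_foldl_insert_key sortedItems (fun p => p.1)
      (fun d p => PySem.List.sorted p.2 (fun x => x) false) PySem.Dict.empty
      (by simp [PySem.Dict.keys_empty])
  by_cases hc : fam ∈ families.keys
  · obtain ⟨v, hv⟩ : ∃ v, families.get? fam = some v := by
      cases h : families.get? fam with
      | none => exact absurd ((PySem.Dict.get?_eq_none_iff_not_mem_keys families fam).mp h) (by simpa using hc)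
      | some v => exact ⟨v, rfl⟩
    have hveq : v = cols.filter (fun c => inferFamily c == fam) := by
      rw [← h1, PySem.Dict.getD_eq_get?_getD, hv]; rfl
    have hmem : (fam, v) ∈ families.items :=
      (PySem.Dict.get?_eq_some_iff_mem_items families fam v hn).mp hv
    have hmem2 : (fam, v) ∈ sortedItems := by
      rw [hsi, PySem.List.mem_sorted]; exact hmem
    have hmem3 : (fam, PySem.List.sorted v (fun x => x) false) ∈ (sortedItems.foldl
        (fun d p => d.insert p.1 (PySem.List.sorted p.2 (fun x => x) false)) PySem.Dict.empty).items := by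
      rw [hitems]
      exact List.mem_map.mpr ⟨(fam, v), hmem2, rfl⟩
    rw [PySem.Dict.getD_of_mem_items _ hmem3 hnd3, hveq]
  · have hfilter : cols.filter (fun c => inferFamily c == fam) = [] := by
      rw [List.filter_eq_nil_iff]
      intro c hcmem hbeq
      exact hc (by
        rw [hk]
        exact (PySem.Set.mem_ofList _ _).mpr (List.mem_map.mpr ⟨c, hcmem, by simpa using hbeq⟩))
    have hnc : (sortedItems.foldl
        (fun d p => d.insert p.1 (PySem.List.sorted p.2 (fun x => x) false)) PySem.Dict.empty).contains fam = false := by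
      rw [Bool.eq_false_iff]
      intro hcc
      have := (PySem.Dict.contains_iff_mem_keys _ fam).mp hcc
      have hkeys : (sortedItems.foldl
          (fun d p => d.insert p.1 (PySem.List.sorted p.2 (fun x => x) false)) PySem.Dict.empty).keys
          = sortedItems.map (fun p => p.1) := by
        simp [PySem.Dict.keys, hitems, List.map_map, Function.comp_def]
      rw [hkeys] at this
      exact hc (hpm.mem_iff.mp this)
    rw [PySem.Dict.getD_of_not_contains _ _ hnc, hfilter]
    simp [PySem.List.sorted]

theorem mem_famMap_getD (cols : List String) (fam c : String) :
    c ∈ (buildFeatureFamilyMap cols).getD fam [] ↔ inferFamily c = fam ∧ c ∈ cols := by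
  rw [famMap_getD]
  simp [PySem.List.mem_sorted, List.mem_filter, and_comm]

theorem mem_foldl_update {α : Type} [BEq α] [LawfulBEq α] (g : String → List α) (l : List String) (s : PySem.Set α) (c : α) :
    c ∈ l.foldl (fun s fam => PySem.Set.update s (g fam)) s ↔ c ∈ s ∨ ∃ fam ∈ l, c ∈ g fam := by
  induction l generalizing s with
  | nil => simp
  | cons x t ih =>
    simp only [List.foldl_cons, ih, PySem.Set.mem_update, List.mem_cons]
    constructor
    · rintro (⟨h | h⟩ | ⟨f, hf, hc⟩)
      · exact Or.inl h
      · exact Or.inr ⟨x, Or.inl rfl, h⟩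
      · exact Or.inr ⟨f, Or.inr hf, hc⟩
    · rintro (h | ⟨f, rfl | hf, hc⟩)
      · exact Or.inl (Or.inl h)
      · exact Or.inl (Or.inr hc)
      · exact Or.inr ⟨f, hf, hc⟩

-- A's excluded column set tests exactly 'inferred family is in exclude_families', for columns of the input.
theorem contains_excluded (cols exc : List String) (c : String) (hc : c ∈ cols) :
    PySem.Set.contains
      (exc.foldl (fun s fam => PySem.Set.update s ((buildFeatureFamilyMap cols).getD fam [])) PySem.Set.empty) c
      = decide (inferFamily c ∈ exc) := by
  rw [PySem.Set.contains_eq_decide]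
  congr 1
  simp only [eq_iff_iff]
  rw [mem_foldl_update (fun fam => (buildFeatureFamilyMap cols).getD fam []) exc PySem.Set.empty c]
  constructor
  · rintro (h | ⟨fam, hf, hcf⟩)
    · exact absurd h (by simp [PySem.Set.empty])
    · rw [mem_famMap_getD] at hcf
      exact hcf.1 ▸ hf
  · intro h
    exact Or.inr ⟨inferFamily c, h, (mem_famMap_getD cols (inferFamily c) c).mpr ⟨rfl, hc⟩⟩

theorem flatMap_ite_nil {α β : Type} (l : List α) (q : α → Bool) (g : α → List β) :
    (l.flatMap fun x => if q x then g x else []) = (l.filter q).flatMap g := by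
  induction l with
  | nil => rfl
  | cons x t ih =>
    by_cases h : q x = true <;> simp [List.flatMap_cons, h, ih]

-- ===== VERDICT (by name: the statement is the Claim_ definition above) =====
theorem select_features_by_family_spec : Claim_equal_select_features_by_family := by
  intro cols inc? exc? _
  unfold Spec_select_features_by_family select_features_by_family select_features_by_family_alt
  simp only []
  set inc := inc?.getD [] with hinc
  set exc := exc?.getD [] with hexc
  have hpairs : ∀ fam : String,
      (((cols.map (fun c => (inferFamily c, c))).filter (fun p => p.1 == fam)).map (fun p => p.2))
        = cols.filter (fun c => inferFamily c == fam) := by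
    intro fam
    simp [List.filter_map, List.map_map, Function.comp_def]
  have hbad : ∀ fam : String, PySem.Set.contains (PySem.Set.ofList exc) fam = decide (fam ∈ exc) := by
    intro fam
    rw [PySem.Set.contains_eq_decide]
    simp [PySem.Set.mem_ofList]
  by_cases hi : inc ≠ []
  · -- include branch: A extends every family's chunk then filters; B skips excluded families
    simp only [if_pos hi]
    have hA : inc.foldl (fun acc fam => acc ++ (buildFeatureFamilyMap cols).getD fam []) []
        = inc.flatMap (fun fam => PySem.List.sorted (cols.filter (fun c => inferFamily c == fam)) (fun x => x) false) := by
      rw [PySem.List.foldl_append_eq_flatMap, List.nil_append]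
      apply List.flatMap_congr
      intro fam _
      rw [famMap_getD]
    have hB : inc.foldl (fun acc fam =>
        if !(PySem.Set.contains (PySem.Set.ofList exc) fam) then
          acc ++ PySem.List.sorted (((cols.map (fun c => (inferFamily c, c))).filter (fun p => p.1 == fam)).map (fun p => p.2)) (fun x => x) false
        else acc) []
        = (inc.filter (fun fam => !(PySem.Set.contains (PySem.Set.ofList exc) fam))).flatMap
            (fun fam => PySem.List.sorted (cols.filter (fun c => inferFamily c == fam)) (fun x => x) false) := by
      rw [PySem.List.foldl_if_eq_foldl_filter, PySem.List.foldl_append_eq_flatMap, List.nil_append]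
      apply List.flatMap_congr
      intro fam _
      rw [hpairs]
    by_cases he : exc ≠ []
    · simp only [if_pos he]
      rw [hA, hB, List.filter_flatMap, ← flatMap_ite_nil]
      apply List.flatMap_congr
      intro fam _
      have hchunk : ∀ c ∈ PySem.List.sorted (cols.filter (fun c => inferFamily c == fam)) (fun x => x) false,
          inferFamily c = fam ∧ c ∈ cols := by
        intro c hc
        rw [PySem.List.mem_sorted, List.mem_filter] at hc
        exact ⟨by simpa using hc.2, hc.1⟩
      by_cases hq : fam ∈ exc
      · rw [if_neg (by rw [hbad fam]; simp [hq])]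
        apply List.filter_eq_nil_iff.mpr
        intro c hc
        rw [contains_excluded cols exc c (hchunk c hc).2]
        simp [(hchunk c hc).1, hq]
      · rw [if_pos (by rw [hbad fam]; simp [hq])]
        apply List.filter_eq_self.mpr
        intro c hc
        rw [contains_excluded cols exc c (hchunk c hc).2]
        simp [(hchunk c hc).1, hq]
    · simp only [if_neg he]
      have he' : exc = [] := by simpa using he
      rw [hA, hB, he']
      simp [PySem.Set.ofList, PySem.Set.empty]
  · -- no include families: A copies then filters; B filters directly
    simp only [if_neg hi]
    by_cases he : exc ≠ []
    · simp only [if_pos he]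
      apply List.filter_congr
      intro c hc
      rw [contains_excluded cols exc c hc, hbad]
    · simp only [if_neg he]
      have he' : exc = [] := by simpa using he
      rw [he']
      have : ∀ c ∈ cols, (!(PySem.Set.contains (PySem.Set.ofList ([]:List String)) (inferFamily c))) = true := by
        intro c _
        simp [PySem.Set.ofList, PySem.Set.empty]
      rw [List.filter_eq_self.mpr this]
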